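-- pv_equiv track=rewrite | github.com/volcengine/verl | atropos/environments/intern_bootcamp/internbootcamp_lib/internbootcamp/bootcamp/drectanglepainting1/drectanglepainting1.py | compute_min_cost
-- ===== SOURCE A (Python) =====
-- def compute_min_cost(n, grid):
--     # 初始化前缀和数组（从1开始索引）
--     f = [[0]*(n+2) for _ in range(n+2)]
--     for i in range(1, n+1):
--         for j in range(1, n+1):
--             cell_value = 1 if grid[i-1][j-1] == '#' else 0
--             f[i][j] = f[i-1][j] + f[i][j-1] - f[i-1][j-1] + cell_value
--
--     # 初始化四维DP数组
--     d = [[[[0]*(n+2) for _ in range(n+2)]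
--          for __ in range(n+2)]
--          for ___ in range(n+2)]
--
--     # 动态规划计算
--     for i in range(n, 0, -1):
--         for j in range(n, 0, -1):
--             for ii in range(i, n+1):
--                 for jj in range(j, n+1):
--                     # 计算当前区域的黑块总数
--                     total = f[ii][jj] - f[i-1][jj] - f[ii][j-1] + f[i-1][j-1]
--
--                     if total == 0:
--                         d[i][j][ii][jj] = 0
--                         continue
--
--                     # 初始值为区域的最大边长
--                     h = ii - i + 1
--                     w = jj - j + 1
--                     val = max(h, w)
--
--                     # 垂直切分尝试
--                     for k in range(j, jj):
--                         val = min(val, d[i][j][ii][k] + d[i][k+1][ii][jj])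
--
--                     # 水平切分尝试
--                     for k in range(i, ii):
--                         val = min(val, d[i][j][k][jj] + d[k+1][j][ii][jj])
--
--                     d[i][j][ii][jj] = val
--
--     return d[1][1][n][n]
-- ===== SOURCE B (Python) =====
-- def compute_min_cost(n, grid):
--     # 2D prefix sums of black cells, 1-based, same table as the straightforward version
--     f = [[0] * (n + 2) for _ in range(n + 2)]
--     for i in range(1, n + 1):
--         for j in range(1, n + 1):
--             f[i][j] = f[i - 1][j] + f[i][j - 1] - f[i - 1][j - 1] \
--                 + (1 if grid[i - 1][j - 1] == '#' else 0)
--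
--     memo = {}
--
--     def solve(i, j, ii, jj):
--         key = (i, j, ii, jj)
--         if key in memo:
--             return memo[key]
--         total = f[ii][jj] - f[i - 1][jj] - f[ii][j - 1] + f[i - 1][j - 1]
--         if total == 0:
--             memo[key] = 0
--             return 0
--         val = max(ii - i + 1, jj - j + 1)
--         for k in range(j, jj):
--             val = min(val, solve(i, j, ii, k) + solve(i, k + 1, ii, jj))
--         for k in range(i, ii):
--             val = min(val, solve(i, j, k, jj) + solve(k + 1, j, ii, jj))
--         memo[key] = val
--         return val
--
--     return solve(1, 1, n, n)
-- ===== Notes on version B (the rewrite author's own statement) =====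
-- stated objective: alternative
-- what changed: The bottom-up 4D DP table filled by four nested reverse-order loops is replaced by a top-down memoized recursion solve(i,j,ii,jj) over subrectangles (same prefix-sum table, same recurrence), which visits only reachable subproblems and skips the subtrees of empty regions.
import Mathlib
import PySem

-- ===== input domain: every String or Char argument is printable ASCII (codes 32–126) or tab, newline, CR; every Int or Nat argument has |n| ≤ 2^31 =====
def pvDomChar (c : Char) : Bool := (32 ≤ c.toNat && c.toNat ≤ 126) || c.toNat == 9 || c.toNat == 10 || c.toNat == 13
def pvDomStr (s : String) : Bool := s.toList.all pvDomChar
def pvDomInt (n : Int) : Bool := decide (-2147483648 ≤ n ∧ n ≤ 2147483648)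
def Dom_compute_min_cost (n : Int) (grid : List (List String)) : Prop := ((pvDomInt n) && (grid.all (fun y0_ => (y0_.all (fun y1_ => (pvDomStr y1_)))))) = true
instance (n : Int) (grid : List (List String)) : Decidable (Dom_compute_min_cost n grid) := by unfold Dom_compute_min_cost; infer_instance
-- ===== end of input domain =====

-- B replaces A's bottom-up 4D DP table (four nested reverse loops) by a top-down memoized
-- recursion over subrectangles with the same prefix-sum table and recurrence (objective: alternative).


-- ===== PORT A =====
-- The Python lists f (size (n+2)^2) and d (size (n+2)^4) are 0-initialized arrays that are,
-- on Pre_, only read at in-range non-negative indices; they are ported as finite maps from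
-- index tuples (PySem.Dict), read with default 0: 0 everywhere until written (exact there).
abbrev Tab2 : Type := (Int × Int) → Int
abbrev Tab4 : Type := PySem.Dict (Int × Int × Int × Int) Int

-- grid[i-1][j-1] == '#' (in-range on Pre_, so the defaults never matter there).
-- pvCell and pvFTab are shared by both ports: Source A and Source B build the prefix-sum table f
-- with identical code.
def pvCellA (grid : List (List String)) (i j : Int) : Int :=
  if PySem.List.pyGetD (PySem.List.pyGetD grid (i-1) []) (j-1) "" = "#" then 1 else 0

def pvFTabA (n : Int) (grid : List (List String)) : PySem.Dict (Int × Int) Int :=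
  (PySem.List.pyRange 1 (n+1) 1).foldl (fun f i =>
    (PySem.List.pyRange 1 (n+1) 1).foldl (fun f j =>
      f.insert (i, j) (f.getD (i-1, j) 0 + f.getD (i, j-1) 0 - f.getD (i-1, j-1) 0
        + pvCellA grid i j)) f)
    PySem.Dict.empty


-- body of the innermost (jj) loop of A
def pvCellStep (f : Tab2) (i j ii jj : Int) (d : Tab4) : Tab4 :=
  if f (ii, jj) - f (i-1, jj) - f (ii, j-1) + f (i-1, j-1) = 0 then
    d.insert (i, j, ii, jj) 0
  else
    d.insert (i, j, ii, jj)
      ((PySem.List.pyRange i ii 1).foldl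
        (fun val k => min val (d.getD (i, j, k, jj) 0 + d.getD (k+1, j, ii, jj) 0))
        ((PySem.List.pyRange j jj 1).foldl
          (fun val k => min val (d.getD (i, j, ii, k) 0 + d.getD (i, k+1, ii, jj) 0))
          (max (ii - i + 1) (jj - j + 1))))

def pvLoopJJ (f : Tab2) (n i j ii : Int) (d : Tab4) : Tab4 :=
  (PySem.List.pyRange j (n+1) 1).foldl (fun d jj => pvCellStep f i j ii jj d) d

def pvLoopII (f : Tab2) (n i j : Int) (d : Tab4) : Tab4 :=
  (PySem.List.pyRange i (n+1) 1).foldl (fun d ii => pvLoopJJ f n i j ii d) d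

def pvLoopJ (f : Tab2) (n i : Int) (d : Tab4) : Tab4 :=
  (PySem.List.pyRange n 0 (-1)).foldl (fun d j => pvLoopII f n i j d) d

def pvLoopI (f : Tab2) (n : Int) (d : Tab4) : Tab4 :=
  (PySem.List.pyRange n 0 (-1)).foldl (fun d i => pvLoopJ f n i d) d

def compute_min_cost (n : Int) (grid : List (List String)) : Int :=
  let fD := pvFTabA n grid
  (pvLoopI (fun p => fD.getD p 0) n PySem.Dict.empty).getD (1, 1, n, n) 0

-- ===== PORT B =====
-- Source B builds the same prefix-sum table f (via the shared pvFTabA above), then runs a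
-- memoized recursion solve(i,j,ii,jj)
-- with a dict memo.  The memo dict is threaded through as state; Python's unbounded recursion
-- is ported with a Nat fuel that strictly exceeds the recursion depth at the top call
-- (depth ≤ (ii-i)+(jj-j)+1), so the fuel-0 branch is never reached there.
abbrev Memo : Type := PySem.Dict (Int × Int × Int × Int) Int

def pvSolve (f : Tab2) : Nat → Int → Int → Int → Int → Memo → Int × Memo
  | 0, _, _, _, _, memo => (0, memo)   -- fuel exhausted: unreachable at the top call's budget
  | fuel+1, i, j, ii, jj, memo =>
    match memo.get? (i, j, ii, jj) with
    | some v => (v, memo)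
    | none =>
      if f (ii, jj) - f (i-1, jj) - f (ii, j-1) + f (i-1, j-1) = 0 then
        (0, memo.insert (i, j, ii, jj) 0)
      else
        let p := (PySem.List.pyRange j jj 1).foldl
          (fun (p : Int × Memo) k =>
            let r1 := pvSolve f fuel i j ii k p.2
            let r2 := pvSolve f fuel i (k+1) ii jj r1.2
            (min p.1 (r1.1 + r2.1), r2.2))
          (max (ii - i + 1) (jj - j + 1), memo)
        let q := (PySem.List.pyRange i ii 1).foldl
          (fun (p : Int × Memo) k =>
            let r1 := pvSolve f fuel i j k jj p.2
            let r2 := pvSolve f fuel (k+1) j ii jj r1.2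
            (min p.1 (r1.1 + r2.1), r2.2))
          p
        (q.1, q.2.insert (i, j, ii, jj) q.1)

def compute_min_cost_alt (n : Int) (grid : List (List String)) : Int :=
  let fD := pvFTabA n grid
  (pvSolve (fun p => fD.getD p 0) ((2*n).toNat + 2) 1 1 n n PySem.Dict.empty).1

-- ===== PRECONDITION & SPEC =====
-- Pre_: exactly the inputs where Python A returns normally: n ≥ 0, at least n rows, and each
-- of the first n rows has at least n entries (otherwise A raises IndexError).
def Pre_compute_min_cost (n : Int) (grid : List (List String)) : Prop :=
  0 ≤ n ∧ n.toNat ≤ grid.length ∧ ∀ row ∈ grid.take n.toNat, n.toNat ≤ row.length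
instance (n : Int) (grid : List (List String)) : Decidable (Pre_compute_min_cost n grid) := by
  unfold Pre_compute_min_cost; infer_instance

def pvWitness_compute_min_cost : Int × List (List String) := (1, [["#"]])

def Spec_compute_min_cost (n : Int) (grid : List (List String)) (out : Int) : Prop := out = compute_min_cost_alt n grid
instance (n : Int) (grid : List (List String)) (out : Int) : Decidable (Spec_compute_min_cost n grid out) := by unfold Spec_compute_min_cost; infer_instance

-- ===== CLAIM (what is proved, stated in full; the proofs are below) =====
def Claim_equal_compute_min_cost : Prop := ∀ (n : Int) (grid : List (List String)), Dom_compute_min_cost n grid → Pre_compute_min_cost n grid → Spec_compute_min_cost n grid (compute_min_cost n grid)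

-- ===== LEMMAS AND PROOFS =====

-- the f table as a read function (what the ports' let-bound closure denotes)
def pvFRead (n : Int) (grid : List (List String)) : Tab2 :=
  fun p => (pvFTabA n grid).getD p 0

-- fuel-indexed specification of the common recurrence, and its stable value pvOpt
def pvOptF (f : Tab2) : Nat → Int → Int → Int → Int → Int
  | 0, _, _, _, _ => 0
  | fuel+1, i, j, ii, jj =>
    if f (ii, jj) - f (i-1, jj) - f (ii, j-1) + f (i-1, j-1) = 0 then 0
    else (PySem.List.pyRange i ii 1).foldl
      (fun val k => min val (pvOptF f fuel i j k jj + pvOptF f fuel (k+1) j ii jj))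
      ((PySem.List.pyRange j jj 1).foldl
        (fun val k => min val (pvOptF f fuel i j ii k + pvOptF f fuel i (k+1) ii jj))
        (max (ii - i + 1) (jj - j + 1)))

def pvMu (i j ii jj : Int) : Nat := ((ii - i) + (jj - j)).toNat

def pvOpt (f : Tab2) (i j ii jj : Int) : Int := pvOptF f (pvMu i j ii jj + 1) i j ii jj

lemma pvOptF_stable (f : Tab2) :
    ∀ (fuel1 fuel2 : Nat) (i j ii jj : Int), i ≤ ii → j ≤ jj →
      pvMu i j ii jj < fuel1 → pvMu i j ii jj < fuel2 →
      pvOptF f fuel1 i j ii jj = pvOptF f fuel2 i j ii jj := by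
  intro fuel1
  induction fuel1 with
  | zero => intro fuel2 i j ii jj _ _ h3 _; exact absurd h3 (by omega)
  | succ f1 ih =>
    intro fuel2 i j ii jj h1 h2 h3 h4
    cases fuel2 with
    | zero => exact absurd h4 (by omega)
    | succ f2 =>
      simp only [pvOptF]
      by_cases h0 : f (ii, jj) - f (i-1, jj) - f (ii, j-1) + f (i-1, j-1) = 0
      · simp [h0]
      · simp only [if_neg h0]
        have hv : (PySem.List.pyRange j jj 1).foldl
            (fun val k => min val (pvOptF f f1 i j ii k + pvOptF f f1 i (k+1) ii jj))
            (max (ii - i + 1) (jj - j + 1))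
            = (PySem.List.pyRange j jj 1).foldl
            (fun val k => min val (pvOptF f f2 i j ii k + pvOptF f f2 i (k+1) ii jj))
            (max (ii - i + 1) (jj - j + 1)) := by
          apply PySem.List.foldl_congr_mem
          intro acc k hk
          rw [PySem.List.mem_pyRange_one] at hk
          rw [ih f2 i j ii k h1 hk.1 (by simp only [pvMu] at *; omega) (by simp only [pvMu] at *; omega),
              ih f2 i (k+1) ii jj h1 (by omega) (by simp only [pvMu] at *; omega) (by simp only [pvMu] at *; omega)]
        rw [hv]
        apply PySem.List.foldl_congr_mem
        intro acc k hk
        rw [PySem.List.mem_pyRange_one] at hk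
        rw [ih f2 i j k jj hk.1 h2 (by simp only [pvMu] at *; omega) (by simp only [pvMu] at *; omega),
            ih f2 (k+1) j ii jj (by omega) h2 (by simp only [pvMu] at *; omega) (by simp only [pvMu] at *; omega)]

lemma pvOptF_eq_opt (f : Tab2) (fuel : Nat) (i j ii jj : Int) (h1 : i ≤ ii) (h2 : j ≤ jj)
    (h3 : pvMu i j ii jj < fuel) : pvOptF f fuel i j ii jj = pvOpt f i j ii jj := by
  exact pvOptF_stable f fuel (pvMu i j ii jj + 1) i j ii jj h1 h2 h3 (Nat.lt_succ_self _)

-- ===== A-side: the table invariant =====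
def pvValid (n a b aa bb : Int) : Prop := 1 ≤ a ∧ a ≤ aa ∧ aa ≤ n ∧ 1 ≤ b ∧ b ≤ bb ∧ bb ≤ n

def pvCorr (f : Tab2) (n : Int) (d : Tab4) (S : Int → Int → Int → Int → Prop) : Prop :=
  ∀ a b aa bb, pvValid n a b aa bb → S a b aa bb → d.getD (a, b, aa, bb) 0 = pvOpt f a b aa bb

lemma pvCorr_mono (f : Tab2) (n : Int) (d : Tab4) (S S' : Int → Int → Int → Int → Prop)
    (h : pvCorr f n d S)
    (hss : ∀ a b aa bb, pvValid n a b aa bb → S' a b aa bb → S a b aa bb) :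
    pvCorr f n d S' := fun a b aa bb hv hs => h a b aa bb hv (hss a b aa bb hv hs)

lemma pvCellStep_corr (f : Tab2) (n i j ii jj : Int) (d : Tab4)
    (hi : 1 ≤ i) (hii : i ≤ ii) (hn : ii ≤ n) (hj : 1 ≤ j) (hjj : j ≤ jj) (hm : jj ≤ n)
    (hd : pvCorr f n d (fun a b aa bb =>
      a > i ∨ (a = i ∧ b > j) ∨ (a = i ∧ b = j ∧ (aa < ii ∨ (aa = ii ∧ bb < jj))))) :
    pvCorr f n (pvCellStep f i j ii jj d) (fun a b aa bb =>
      a > i ∨ (a = i ∧ b > j) ∨ (a = i ∧ b = j ∧ (aa < ii ∨ (aa = ii ∧ bb ≤ jj)))) := by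
  intro a b aa bb hv hs
  have hvv := hv
  unfold pvValid at hvv
  unfold pvCellStep
  by_cases h0 : f (ii, jj) - f (i-1, jj) - f (ii, j-1) + f (i-1, j-1) = 0
  · rw [if_pos h0, PySem.Dict.getD_insert]
    by_cases he : (a, b, aa, bb) = (i, j, ii, jj)
    · rw [if_pos he]
      simp only [Prod.mk.injEq] at he
      obtain ⟨ha, hb2, hc, hd2⟩ := he
      rw [ha, hb2, hc, hd2]
      unfold pvOpt
      simp only [pvOptF]
      rw [if_pos h0]
    · rw [if_neg he]
      apply hd a b aa bb hv
      simp only [Prod.mk.injEq] at he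
      omega
  · rw [if_neg h0, PySem.Dict.getD_insert]
    by_cases he : (a, b, aa, bb) = (i, j, ii, jj)
    · rw [if_pos he]
      simp only [Prod.mk.injEq] at he
      obtain ⟨ha, hb2, hc, hd2⟩ := he
      rw [ha, hb2, hc, hd2]
      have hopt : pvOpt f i j ii jj = (PySem.List.pyRange i ii 1).foldl
          (fun val k => min val (pvOptF f (pvMu i j ii jj) i j k jj
            + pvOptF f (pvMu i j ii jj) (k+1) j ii jj))
          ((PySem.List.pyRange j jj 1).foldl
            (fun val k => min val (pvOptF f (pvMu i j ii jj) i j ii k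
              + pvOptF f (pvMu i j ii jj) i (k+1) ii jj))
            (max (ii - i + 1) (jj - j + 1))) := by
        unfold pvOpt
        simp only [pvOptF]
        rw [if_neg h0]
      rw [hopt]
      have hin : (PySem.List.pyRange j jj 1).foldl
          (fun val k => min val (d.getD (i, j, ii, k) 0 + d.getD (i, k+1, ii, jj) 0))
          (max (ii - i + 1) (jj - j + 1))
          = (PySem.List.pyRange j jj 1).foldl
          (fun val k => min val (pvOptF f (pvMu i j ii jj) i j ii k
            + pvOptF f (pvMu i j ii jj) i (k+1) ii jj))
          (max (ii - i + 1) (jj - j + 1)) := by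
        apply PySem.List.foldl_congr_mem
        intro acc k hk
        rw [PySem.List.mem_pyRange_one] at hk
        have d1 : d.getD (i, j, ii, k) 0 = pvOpt f i j ii k :=
          hd i j ii k (by unfold pvValid; omega) (by beta_reduce; omega)
        have d2 : d.getD (i, k+1, ii, jj) 0 = pvOpt f i (k+1) ii jj :=
          hd i (k+1) ii jj (by unfold pvValid; omega) (by beta_reduce; omega)
        rw [d1, d2,
          pvOptF_eq_opt f _ i j ii k hii hk.1 (by simp only [pvMu]; omega),
          pvOptF_eq_opt f _ i (k+1) ii jj hii (by omega) (by simp only [pvMu]; omega)]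
      rw [hin]
      apply PySem.List.foldl_congr_mem
      intro acc k hk
      rw [PySem.List.mem_pyRange_one] at hk
      have d1 : d.getD (i, j, k, jj) 0 = pvOpt f i j k jj :=
        hd i j k jj (by unfold pvValid; omega) (by beta_reduce; omega)
      have d2 : d.getD (k+1, j, ii, jj) 0 = pvOpt f (k+1) j ii jj :=
        hd (k+1) j ii jj (by unfold pvValid; omega) (by beta_reduce; omega)
      rw [d1, d2,
        pvOptF_eq_opt f _ i j k jj hk.1 hjj (by simp only [pvMu]; omega),
        pvOptF_eq_opt f _ (k+1) j ii jj (by omega) hjj (by simp only [pvMu]; omega)]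
    · rw [if_neg he]
      apply hd a b aa bb hv
      simp only [Prod.mk.injEq] at he
      omega

lemma pvLoopJJ_aux (f : Tab2) (n i j ii : Int)
    (hi : 1 ≤ i) (hii : i ≤ ii) (hn : ii ≤ n) (hj : 1 ≤ j) :
    ∀ (m : Nat) (jj0 : Int) (d : Tab4), (n + 1 - jj0).toNat = m → j ≤ jj0 →
      pvCorr f n d (fun a b aa bb =>
        a > i ∨ (a = i ∧ b > j) ∨ (a = i ∧ b = j ∧ (aa < ii ∨ (aa = ii ∧ bb < jj0)))) →
      pvCorr f n ((PySem.List.pyRange jj0 (n+1) 1).foldl (fun d jj => pvCellStep f i j ii jj d) d)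
        (fun a b aa bb => a > i ∨ (a = i ∧ b > j) ∨ (a = i ∧ b = j ∧ aa ≤ ii)) := by
  intro m
  induction m with
  | zero =>
    intro jj0 d hm hj0 hd
    rw [PySem.List.pyRange_one_eq_nil (by omega)]
    simp only [List.foldl_nil]
    apply pvCorr_mono f n d _ _ hd
    intro a b aa bb hv hs
    unfold pvValid at hv
    omega
  | succ m ihm =>
    intro jj0 d hm hj0 hd
    rw [PySem.List.pyRange_one_cons (by omega : jj0 < n + 1)]
    simp only [List.foldl_cons]
    apply ihm (jj0 + 1) _ (by omega) (by omega)
    have hstep := pvCellStep_corr f n i j ii jj0 d hi hii hn hj hj0 (by omega) hd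
    apply pvCorr_mono f n _ _ _ hstep
    intro a b aa bb hv hs
    unfold pvValid at hv
    omega

lemma pvLoopJJ_corr (f : Tab2) (n i j ii : Int) (d : Tab4)
    (hi : 1 ≤ i) (hii : i ≤ ii) (hn : ii ≤ n) (hj : 1 ≤ j) (hm : j ≤ n)
    (hd : pvCorr f n d (fun a b aa bb =>
      a > i ∨ (a = i ∧ b > j) ∨ (a = i ∧ b = j ∧ aa < ii))) :
    pvCorr f n (pvLoopJJ f n i j ii d) (fun a b aa bb =>
      a > i ∨ (a = i ∧ b > j) ∨ (a = i ∧ b = j ∧ aa ≤ ii)) := by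
  unfold pvLoopJJ
  apply pvLoopJJ_aux f n i j ii hi hii hn hj (n + 1 - j).toNat j d rfl le_rfl
  apply pvCorr_mono f n d _ _ hd
  intro a b aa bb hv hs
  unfold pvValid at hv
  omega

lemma pvLoopII_aux (f : Tab2) (n i j : Int)
    (hi : 1 ≤ i) (hin : i ≤ n) (hj : 1 ≤ j) (hm : j ≤ n) :
    ∀ (m : Nat) (ii0 : Int) (d : Tab4), (n + 1 - ii0).toNat = m → i ≤ ii0 →
      pvCorr f n d (fun a b aa _ =>
        a > i ∨ (a = i ∧ b > j) ∨ (a = i ∧ b = j ∧ aa < ii0)) →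
      pvCorr f n ((PySem.List.pyRange ii0 (n+1) 1).foldl (fun d ii => pvLoopJJ f n i j ii d) d)
        (fun a b _ _ => a > i ∨ (a = i ∧ b ≥ j)) := by
  intro m
  induction m with
  | zero =>
    intro ii0 d hmm hi0 hd
    rw [PySem.List.pyRange_one_eq_nil (by omega)]
    simp only [List.foldl_nil]
    apply pvCorr_mono f n d _ _ hd
    intro a b aa bb hv hs
    unfold pvValid at hv
    omega
  | succ m ihm =>
    intro ii0 d hmm hi0 hd
    rw [PySem.List.pyRange_one_cons (by omega : ii0 < n + 1)]
    simp only [List.foldl_cons]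
    apply ihm (ii0 + 1) _ (by omega) (by omega)
    have hstep := pvLoopJJ_corr f n i j ii0 d hi hi0 (by omega) hj hm hd
    apply pvCorr_mono f n _ _ _ hstep
    intro a b aa bb hv hs
    unfold pvValid at hv
    omega

lemma pvLoopII_corr (f : Tab2) (n i j : Int) (d : Tab4)
    (hi : 1 ≤ i) (hin : i ≤ n) (hj : 1 ≤ j) (hm : j ≤ n)
    (hd : pvCorr f n d (fun a b _ _ => a > i ∨ (a = i ∧ b > j))) :
    pvCorr f n (pvLoopII f n i j d) (fun a b _ _ => a > i ∨ (a = i ∧ b ≥ j)) := by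
  unfold pvLoopII
  apply pvLoopII_aux f n i j hi hin hj hm (n + 1 - i).toNat i d rfl le_rfl
  apply pvCorr_mono f n d _ _ hd
  intro a b aa bb hv hs
  unfold pvValid at hv
  omega

lemma pvLoopJ_aux (f : Tab2) (n i : Int) (hi : 1 ≤ i) (hin : i ≤ n) :
    ∀ (m : Nat) (j0 : Int) (d : Tab4), j0.toNat = m → j0 ≤ n →
      pvCorr f n d (fun a b _ _ => a > i ∨ (a = i ∧ b > j0)) →
      pvCorr f n ((PySem.List.pyRange j0 0 (-1)).foldl (fun d j => pvLoopII f n i j d) d)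
        (fun a _ _ _ => a ≥ i) := by
  intro m
  induction m with
  | zero =>
    intro j0 d hmm hj0 hd
    rw [PySem.List.pyRange_neg_one_eq_nil (by omega)]
    simp only [List.foldl_nil]
    apply pvCorr_mono f n d _ _ hd
    intro a b aa bb hv hs
    unfold pvValid at hv
    omega
  | succ m ihm =>
    intro j0 d hmm hj0 hd
    rw [PySem.List.pyRange_neg_one_cons (by omega : (0:Int) < j0)]
    simp only [List.foldl_cons]
    apply ihm (j0 - 1) _ (by omega) (by omega)
    have hstep := pvLoopII_corr f n i j0 d hi hin (by omega) hj0 hd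
    apply pvCorr_mono f n _ _ _ hstep
    intro a b aa bb hv hs
    unfold pvValid at hv
    omega

lemma pvLoopJ_corr (f : Tab2) (n i : Int) (d : Tab4)
    (hi : 1 ≤ i) (hin : i ≤ n)
    (hd : pvCorr f n d (fun a _ _ _ => a > i)) :
    pvCorr f n (pvLoopJ f n i d) (fun a _ _ _ => a ≥ i) := by
  unfold pvLoopJ
  apply pvLoopJ_aux f n i hi hin n.toNat n d rfl le_rfl
  apply pvCorr_mono f n d _ _ hd
  intro a b aa bb hv hs
  unfold pvValid at hv
  omega

lemma pvLoopI_aux (f : Tab2) (n : Int) :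
    ∀ (m : Nat) (i0 : Int) (d : Tab4), i0.toNat = m → i0 ≤ n →
      pvCorr f n d (fun a _ _ _ => a > i0) →
      pvCorr f n ((PySem.List.pyRange i0 0 (-1)).foldl (fun d i => pvLoopJ f n i d) d)
        (fun _ _ _ _ => True) := by
  intro m
  induction m with
  | zero =>
    intro i0 d hmm hi0 hd
    rw [PySem.List.pyRange_neg_one_eq_nil (by omega)]
    simp only [List.foldl_nil]
    apply pvCorr_mono f n d _ _ hd
    intro a b aa bb hv hs
    unfold pvValid at hv
    omega
  | succ m ihm =>
    intro i0 d hmm hi0 hd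
    rw [PySem.List.pyRange_neg_one_cons (by omega : (0:Int) < i0)]
    simp only [List.foldl_cons]
    apply ihm (i0 - 1) _ (by omega) (by omega)
    have hstep := pvLoopJ_corr f n i0 d (by omega) hi0 hd
    apply pvCorr_mono f n _ _ _ hstep
    intro a b aa bb hv hs
    unfold pvValid at hv
    omega

lemma pvLoopI_corr (f : Tab2) (n : Int) (d : Tab4)
    (hd : pvCorr f n d (fun a _ _ _ => a > n)) :
    pvCorr f n (pvLoopI f n d) (fun _ _ _ _ => True) := by
  unfold pvLoopI
  by_cases hn : 1 ≤ n
  · exact pvLoopI_aux f n n.toNat n d rfl le_rfl hd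
  · rw [PySem.List.pyRange_neg_one_eq_nil (by omega)]
    simp only [List.foldl_nil]
    intro a b aa bb hv _
    unfold pvValid at hv
    exact absurd hv (by omega)

-- ===== B-side: memo correctness =====
def pvMinv (f : Tab2) (memo : Memo) : Prop :=
  ∀ a b aa bb v, memo.get? (a, b, aa, bb) = some v → v = pvOpt f a b aa bb

lemma pvFoldV (f : Tab2) (F : Nat) (i j ii jj : Int)
    (hrec : ∀ (i' j' ii' jj' : Int) (memo : Memo), i' ≤ ii' → j' ≤ jj' →
      pvMu i' j' ii' jj' < F → pvMinv f memo →
      (pvSolve f F i' j' ii' jj' memo).1 = pvOpt f i' j' ii' jj' ∧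
      pvMinv f (pvSolve f F i' j' ii' jj' memo).2)
    (hii : i ≤ ii) (hmu : pvMu i j ii jj ≤ F) :
    ∀ (ks : List Int), (∀ k ∈ ks, j ≤ k ∧ k < jj) → ∀ (v0 : Int) (memo : Memo), pvMinv f memo →
      (ks.foldl (fun (p : Int × Memo) k =>
          let r1 := pvSolve f F i j ii k p.2
          let r2 := pvSolve f F i (k+1) ii jj r1.2
          (min p.1 (r1.1 + r2.1), r2.2)) (v0, memo)).1
        = ks.foldl (fun val k => min val
            (pvOptF f (pvMu i j ii jj) i j ii k + pvOptF f (pvMu i j ii jj) i (k+1) ii jj)) v0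
      ∧ pvMinv f ((ks.foldl (fun (p : Int × Memo) k =>
          let r1 := pvSolve f F i j ii k p.2
          let r2 := pvSolve f F i (k+1) ii jj r1.2
          (min p.1 (r1.1 + r2.1), r2.2)) (v0, memo)).2) := by
  intro ks
  induction ks with
  | nil => intro _ v0 memo hm; exact ⟨rfl, hm⟩
  | cons k ks ihl =>
    intro hb v0 memo hm
    have hbk := hb k (List.mem_cons_self)
    have hbs : ∀ k' ∈ ks, j ≤ k' ∧ k' < jj := fun k' hk' => hb k' (List.mem_cons_of_mem _ hk')
    simp only [List.foldl_cons]
    have h1 := hrec i j ii k memo hii hbk.1 (by simp only [pvMu] at *; omega) hm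
    have h2 := hrec i (k+1) ii jj (pvSolve f F i j ii k memo).2 hii (by omega)
      (by simp only [pvMu] at *; omega) h1.2
    have e1 : pvOptF f (pvMu i j ii jj) i j ii k = pvOpt f i j ii k :=
      pvOptF_eq_opt f _ i j ii k hii hbk.1 (by simp only [pvMu] at *; omega)
    have e2 : pvOptF f (pvMu i j ii jj) i (k+1) ii jj = pvOpt f i (k+1) ii jj :=
      pvOptF_eq_opt f _ i (k+1) ii jj hii (by omega) (by simp only [pvMu] at *; omega)
    have key := ihl hbs (min v0 ((pvSolve f F i j ii k memo).1 +
      (pvSolve f F i (k+1) ii jj (pvSolve f F i j ii k memo).2).1))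
      (pvSolve f F i (k+1) ii jj (pvSolve f F i j ii k memo).2).2 h2.2
    refine ⟨key.1.trans ?_, key.2⟩
    rw [h1.1, h2.1, e1, e2]

lemma pvFoldH (f : Tab2) (F : Nat) (i j ii jj : Int)
    (hrec : ∀ (i' j' ii' jj' : Int) (memo : Memo), i' ≤ ii' → j' ≤ jj' →
      pvMu i' j' ii' jj' < F → pvMinv f memo →
      (pvSolve f F i' j' ii' jj' memo).1 = pvOpt f i' j' ii' jj' ∧
      pvMinv f (pvSolve f F i' j' ii' jj' memo).2)
    (hjj : j ≤ jj) (hmu : pvMu i j ii jj ≤ F) :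
    ∀ (ks : List Int), (∀ k ∈ ks, i ≤ k ∧ k < ii) → ∀ (v0 : Int) (memo : Memo), pvMinv f memo →
      (ks.foldl (fun (p : Int × Memo) k =>
          let r1 := pvSolve f F i j k jj p.2
          let r2 := pvSolve f F (k+1) j ii jj r1.2
          (min p.1 (r1.1 + r2.1), r2.2)) (v0, memo)).1
        = ks.foldl (fun val k => min val
            (pvOptF f (pvMu i j ii jj) i j k jj + pvOptF f (pvMu i j ii jj) (k+1) j ii jj)) v0
      ∧ pvMinv f ((ks.foldl (fun (p : Int × Memo) k =>
          let r1 := pvSolve f F i j k jj p.2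
          let r2 := pvSolve f F (k+1) j ii jj r1.2
          (min p.1 (r1.1 + r2.1), r2.2)) (v0, memo)).2) := by
  intro ks
  induction ks with
  | nil => intro _ v0 memo hm; exact ⟨rfl, hm⟩
  | cons k ks ihl =>
    intro hb v0 memo hm
    have hbk := hb k (List.mem_cons_self)
    have hbs : ∀ k' ∈ ks, i ≤ k' ∧ k' < ii := fun k' hk' => hb k' (List.mem_cons_of_mem _ hk')
    simp only [List.foldl_cons]
    have h1 := hrec i j k jj memo hbk.1 hjj (by simp only [pvMu] at *; omega) hm
    have h2 := hrec (k+1) j ii jj (pvSolve f F i j k jj memo).2 (by omega) hjj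
      (by simp only [pvMu] at *; omega) h1.2
    have e1 : pvOptF f (pvMu i j ii jj) i j k jj = pvOpt f i j k jj :=
      pvOptF_eq_opt f _ i j k jj hbk.1 hjj (by simp only [pvMu] at *; omega)
    have e2 : pvOptF f (pvMu i j ii jj) (k+1) j ii jj = pvOpt f (k+1) j ii jj :=
      pvOptF_eq_opt f _ (k+1) j ii jj (by omega) hjj (by simp only [pvMu] at *; omega)
    have key := ihl hbs (min v0 ((pvSolve f F i j k jj memo).1 +
      (pvSolve f F (k+1) j ii jj (pvSolve f F i j k jj memo).2).1))
      (pvSolve f F (k+1) j ii jj (pvSolve f F i j k jj memo).2).2 h2.2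
    refine ⟨key.1.trans ?_, key.2⟩
    rw [h1.1, h2.1, e1, e2]

lemma pvSolve_corr (f : Tab2) :
    ∀ (fuel : Nat) (i j ii jj : Int) (memo : Memo), i ≤ ii → j ≤ jj →
      pvMu i j ii jj < fuel → pvMinv f memo →
      (pvSolve f fuel i j ii jj memo).1 = pvOpt f i j ii jj ∧
      pvMinv f (pvSolve f fuel i j ii jj memo).2 := by
  intro fuel
  induction fuel with
  | zero => intro i j ii jj memo _ _ h3 _; exact absurd h3 (by omega)
  | succ F ih =>
    intro i j ii jj memo h1 h2 h3 hm
    have hopt : pvOpt f i j ii jj = pvOptF f (pvMu i j ii jj + 1) i j ii jj := rfl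
    cases hget : memo.get? (i, j, ii, jj) with
    | some v =>
      simp only [pvSolve, hget]
      exact ⟨hm i j ii jj v hget, hm⟩
    | none =>
      by_cases h0 : f (ii, jj) - f (i-1, jj) - f (ii, j-1) + f (i-1, j-1) = 0
      · have hoz : pvOpt f i j ii jj = 0 := by
          rw [hopt]; simp only [pvOptF]; rw [if_pos h0]
        simp only [pvSolve, hget, if_pos h0]
        refine ⟨hoz.symm, ?_⟩
        intro a b aa bb v hv
        rw [PySem.Dict.get?_insert] at hv
        by_cases he : (a, b, aa, bb) = (i, j, ii, jj)
        · rw [if_pos he] at hv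
          simp only [Prod.mk.injEq] at he
          obtain ⟨rfl, rfl, rfl, rfl⟩ := he
          cases hv; exact hoz.symm
        · rw [if_neg he] at hv
          exact hm a b aa bb v hv
      · have hfv := pvFoldV f F i j ii jj ih h1 (by omega)
          (PySem.List.pyRange j jj 1)
          (by intro k hk; rw [PySem.List.mem_pyRange_one] at hk; exact hk)
          (max (ii - i + 1) (jj - j + 1)) memo hm
        set pV := (PySem.List.pyRange j jj 1).foldl (fun (p : Int × Memo) k =>
          let r1 := pvSolve f F i j ii k p.2
          let r2 := pvSolve f F i (k+1) ii jj r1.2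
          (min p.1 (r1.1 + r2.1), r2.2)) (max (ii - i + 1) (jj - j + 1), memo) with hpV
        have hfh := pvFoldH f F i j ii jj ih h2 (by omega)
          (PySem.List.pyRange i ii 1)
          (by intro k hk; rw [PySem.List.mem_pyRange_one] at hk; exact hk)
          pV.1 pV.2 hfv.2
        have hsplit : (pV.1, pV.2) = pV := rfl
        rw [hsplit] at hfh
        set qH := (PySem.List.pyRange i ii 1).foldl (fun (p : Int × Memo) k =>
          let r1 := pvSolve f F i j k jj p.2
          let r2 := pvSolve f F (k+1) j ii jj r1.2
          (min p.1 (r1.1 + r2.1), r2.2)) pV with hqH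
        have hval : qH.1 = pvOpt f i j ii jj := by
          rw [hopt]
          simp only [pvOptF]
          rw [if_neg h0]
          rw [hqH, hfh.1, hfv.1]
        simp only [pvSolve, hget, if_neg h0]
        rw [← hpV, ← hqH]
        refine ⟨hval, ?_⟩
        intro a b aa bb v hv
        rw [PySem.Dict.get?_insert] at hv
        by_cases he : (a, b, aa, bb) = (i, j, ii, jj)
        · rw [if_pos he] at hv
          simp only [Prod.mk.injEq] at he
          obtain ⟨rfl, rfl, rfl, rfl⟩ := he
          cases hv; exact hval
        · rw [if_neg he] at hv
          exact hfh.2 a b aa bb v hv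

-- ===== assembling =====
lemma compute_eq_opt (n : Int) (grid : List (List String)) (hn : 1 ≤ n) :
    compute_min_cost n grid = pvOpt (pvFRead n grid) 1 1 n n := by
  have h := pvLoopI_corr (pvFRead n grid) n PySem.Dict.empty
    (by intro a b aa bb hv hs; exact absurd hs (by unfold pvValid at hv; omega))
  exact h 1 1 n n (by unfold pvValid; omega) trivial

lemma alt_eq_opt (n : Int) (grid : List (List String)) (hn : 1 ≤ n) :
    compute_min_cost_alt n grid = pvOpt (pvFRead n grid) 1 1 n n := by
  have h := pvSolve_corr (pvFRead n grid) ((2*n).toNat + 2) 1 1 n n PySem.Dict.empty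
    hn hn (by unfold pvMu; omega)
    (by intro a b aa bb v hv; simp [PySem.Dict.get?_empty] at hv)
  exact h.1

lemma pvFTab_zero (n : Int) (grid : List (List String)) (hn : n ≤ 0) :
    pvFRead n grid = fun _ => 0 := by
  unfold pvFRead pvFTabA
  rw [PySem.List.pyRange_one_eq_nil (by omega)]
  funext p
  simp [PySem.Dict.getD_empty]

lemma both_zero (n : Int) (grid : List (List String)) (hn : n ≤ 0) :
    compute_min_cost n grid = 0 ∧ compute_min_cost_alt n grid = 0 := by
  constructor
  · unfold compute_min_cost pvLoopI
    rw [PySem.List.pyRange_neg_one_eq_nil hn]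
    simp [PySem.Dict.getD_empty]
  · unfold compute_min_cost_alt
    have h2 : (2*n).toNat + 2 = 2 := by omega
    rw [h2]
    show (pvSolve (pvFRead n grid) (1+1) 1 1 n n PySem.Dict.empty).1 = 0
    rw [pvFTab_zero n grid hn]
    simp [pvSolve, PySem.Dict.get?_empty]

-- ===== VERDICT (by name: the statement is the Claim_ definition above) =====
theorem compute_min_cost_spec : Claim_equal_compute_min_cost := by
  intro n grid _hdom _hpre
  unfold Spec_compute_min_cost
  by_cases hn : 1 ≤ n
  · rw [compute_eq_opt n grid hn, alt_eq_opt n grid hn]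
  · obtain ⟨h1, h2⟩ := both_zero n grid (by omega)
    rw [h1, h2]
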